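-- pv_equiv track=rewrite | github.com/The-Briel-Deal/Leet_Code_and_Code_Wars | LeetCode/GoogleChallenge3.py | solution
-- ===== SOURCE A (Python) =====
-- def solution(l):
--     s_length = len(l)
--     c = ([0] * s_length)
--     count = 0
--     for i in range(0, len(l)):
--         j = 0
--         for j in range(0, i):
--             if l[i] % l[j] == 0:
--                 c[i] = c[i] + 1
--                 count = count + c[j]
--     return count
-- ===== SOURCE B (Python) =====
-- def solution(l):
--     n = len(l)
--     total = 0
--     for b in range(n):
--         left = 0
--         for a in range(b):
--             if l[b] % l[a] == 0:
--                 left += 1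
--         right = 0
--         for c in range(b + 1, n):
--             if l[c] % l[b] == 0:
--                 right += 1
--         total += left * right
--     return total
-- ===== Notes on version B (the rewrite author's own statement) =====
-- stated objective: alternative
-- what changed: Replaces A's DP (an auxiliary per-index counter array c whose earlier entries are accumulated into the running total) by a direct per-middle-element count: for each middle index b, multiply the number of earlier divisors of l[b] by the number of later multiples of l[b], and sum the products; no array and no cross-iteration state.
import Mathlib
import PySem

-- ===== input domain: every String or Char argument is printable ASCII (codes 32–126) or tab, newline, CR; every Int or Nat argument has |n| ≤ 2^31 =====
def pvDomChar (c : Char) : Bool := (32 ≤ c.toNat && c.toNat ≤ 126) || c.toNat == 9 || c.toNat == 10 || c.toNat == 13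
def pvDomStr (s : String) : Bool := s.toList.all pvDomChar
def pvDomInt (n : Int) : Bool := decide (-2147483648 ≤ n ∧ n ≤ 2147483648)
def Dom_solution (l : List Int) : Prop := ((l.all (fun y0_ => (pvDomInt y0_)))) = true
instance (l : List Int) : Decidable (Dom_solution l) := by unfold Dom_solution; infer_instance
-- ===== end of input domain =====

-- B replaces A's counter-array DP by a per-middle-index product count (same O(n^2) cost, no auxiliary array).

-- ===== PORT A =====
def solution (l : List Int) : Int :=
  let sLength := l.length
  let c : List Int := List.replicate sLength (0 : Int)
  let count : Int := 0
  let st :=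
    (PySem.List.pyRange 0 (l.length : Int) 1).foldl
      (fun (st : List Int × Int) (i : Int) =>
        (PySem.List.pyRange 0 i 1).foldl
          (fun (st : List Int × Int) (j : Int) =>
            if PySem.Int.mod (PySem.List.pyGetD l i 0) (PySem.List.pyGetD l j 0) = 0 then
              let c' := PySem.List.pySetD st.1 i (PySem.List.pyGetD st.1 i 0 + 1)
              (c', st.2 + PySem.List.pyGetD c' j 0)
            else st)
          st)
      (c, count)
  st.2

-- ===== PORT B =====
def solution_alt (l : List Int) : Int :=
  let n : Int := l.length
  (PySem.List.pyRange 0 n 1).foldl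
    (fun (total : Int) (b : Int) =>
      let left :=
        (PySem.List.pyRange 0 b 1).foldl
          (fun (acc : Int) (a : Int) =>
            if PySem.Int.mod (PySem.List.pyGetD l b 0) (PySem.List.pyGetD l a 0) = 0 then acc + 1 else acc)
          0
      let right :=
        (PySem.List.pyRange (b + 1) n 1).foldl
          (fun (acc : Int) (c : Int) =>
            if PySem.Int.mod (PySem.List.pyGetD l c 0) (PySem.List.pyGetD l b 0) = 0 then acc + 1 else acc)
          0
      total + left * right)
    0

-- ===== PRECONDITION & SPEC =====
-- Pre_ excludes exactly the inputs where Python A raises ZeroDivisionError: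
-- A computes l[i] % l[j] for every j < i, so it raises iff some element before the last is 0.
def Pre_solution (l : List Int) : Prop := ∀ x ∈ l.dropLast, x ≠ 0
instance (l : List Int) : Decidable (Pre_solution l) := by unfold Pre_solution; infer_instance
def pvWitness_solution : List Int := [1, 2, 4]
def Spec_solution (l : List Int) (out : Int) : Prop := out = solution_alt l
instance (l : List Int) (out : Int) : Decidable (Spec_solution l out) := by unfold Spec_solution; infer_instance

-- ===== CLAIM (what is proved, stated in full; the proofs are below) =====
def Claim_equal_solution : Prop := ∀ (l : List Int), Dom_solution l → Pre_solution l → Spec_solution l (solution l)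

-- ===== LEMMAS AND PROOFS =====

-- number of earlier divisors of l[i]
def dcount (l : List Int) (i : Nat) : Int :=
  ∑ j ∈ Finset.range i, if PySem.Int.mod (l.getD i 0) (l.getD j 0) = 0 then 1 else 0

-- number of later multiples of l[b]
def rcount (l : List Int) (b : Nat) : Int :=
  ∑ c ∈ Finset.Ico (b + 1) l.length, if PySem.Int.mod (l.getD c 0) (l.getD b 0) = 0 then 1 else 0

-- Nat-indexed version of A's inner-loop body
def stepA (l : List Int) (i : Nat) (st : List Int × Int) (j : Nat) : List Int × Int :=
  if PySem.Int.mod (l.getD i 0) (l.getD j 0) = 0 then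
    ((st.1.set i (st.1.getD i 0 + 1)),
     st.2 + (st.1.set i (st.1.getD i 0 + 1)).getD j 0)
  else st

def outerA (l : List Int) (st : List Int × Int) (i : Nat) : List Int × Int :=
  (List.range i).foldl (stepA l i) st

lemma getD_set_eq (xs : List Int) (i : Nat) (a : Int) (h : i < xs.length) :
    (xs.set i a).getD i 0 = a := by
  simp [List.getD_eq_getElem?_getD, h]

lemma getD_set_ne (xs : List Int) (i j : Nat) (a : Int) (h : j ≠ i) :
    (xs.set i a).getD j 0 = xs.getD j 0 := by
  have hij : ¬ i = j := fun hh => h hh.symm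
  rw [List.getD_eq_getElem?_getD, List.getD_eq_getElem?_getD, List.getElem?_set, if_neg hij]

lemma set_getD_self (xs : List Int) (i : Nat) (h : i < xs.length) :
    xs.set i (xs.getD i 0) = xs := by
  apply List.ext_getElem?
  intro j
  rw [List.getElem?_set]
  split
  · next heq =>
      subst heq
      simp [h, List.getD_eq_getElem?_getD]
  · rfl

lemma foldl_add_sum (f : Nat → Int) (n : Nat) (s : Int) :
    (List.range n).foldl (fun acc j => acc + f j) s = s + ∑ j ∈ Finset.range n, f j := by
  induction n generalizing s with
  | zero => simp
  | succ m ih => simp [List.range_succ, Finset.sum_range_succ, ih]; ring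

lemma solution_eq_nat (l : List Int) :
    solution l = ((List.range l.length).foldl (outerA l) (List.replicate l.length 0, 0)).2 := by
  unfold solution outerA stepA
  simp only [PySem.List.pyRange_one, List.foldl_map, sub_zero, zero_add, Int.toNat_natCast,
    PySem.List.pyGetD_natCast, PySem.List.pySetD_natCast]

lemma solution_alt_eq_sum (l : List Int) :
    solution_alt l = ∑ b ∈ Finset.range l.length, dcount l b * rcount l b := by
  unfold solution_alt
  simp only [PySem.List.pyRange_one, List.foldl_map, sub_zero, zero_add, Int.toNat_natCast,
    PySem.List.pyGetD_natCast]
  rw [foldl_add_sum]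
  rw [zero_add]
  refine Finset.sum_congr rfl fun b hb => ?_
  have hbn : b < l.length := Finset.mem_range.mp hb
  congr 1
  · -- left count
    have hfun : (fun (acc : Int) (j : Nat) =>
        if PySem.Int.mod (l.getD b 0) (l.getD j 0) = 0 then acc + 1 else acc)
        = (fun (acc : Int) (j : Nat) =>
        acc + (if PySem.Int.mod (l.getD b 0) (l.getD j 0) = 0 then 1 else 0)) := by
      funext acc j
      split_ifs <;> simp
    rw [hfun, foldl_add_sum, zero_add]
    rfl
  · -- right count
    have harg : ∀ k2 : Nat, ((b : Int) + 1 + (k2 : Int)) = (((b + 1 + k2 : Nat) : Int)) := by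
      intro k2; push_cast; ring
    have hbound : (((l.length : Int)) - ((b : Int) + 1)).toNat = l.length - (b + 1) := by
      omega
    simp only [harg, hbound, PySem.List.pyGetD_natCast]
    have hfun : (fun (acc : Int) (k2 : Nat) =>
        if PySem.Int.mod (l.getD (b + 1 + k2) 0) (l.getD b 0) = 0 then acc + 1 else acc)
        = (fun (acc : Int) (k2 : Nat) =>
        acc + (if PySem.Int.mod (l.getD (b + 1 + k2) 0) (l.getD b 0) = 0 then 1 else 0)) := by
      funext acc k2
      split_ifs <;> simp
    rw [hfun, foldl_add_sum, zero_add]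
    unfold rcount
    rw [Finset.sum_Ico_eq_sum_range]

lemma innerA_spec (l : List Int) (i : Nat) (hi : i < l.length) (c : List Int)
    (hc : c.length = l.length) (cnt : Int) (m : Nat) (hm : m ≤ i) :
    (List.range m).foldl (stepA l i) (c, cnt)
      = (c.set i (c.getD i 0 + ∑ j ∈ Finset.range m,
            (if PySem.Int.mod (l.getD i 0) (l.getD j 0) = 0 then 1 else 0)),
         cnt + ∑ j ∈ Finset.range m,
            (if PySem.Int.mod (l.getD i 0) (l.getD j 0) = 0 then c.getD j 0 else 0)) := by
  have hci : i < c.length := by omega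
  induction m with
  | zero =>
    simp only [List.range_zero, List.foldl_nil, Finset.sum_range_zero, add_zero]
    rw [set_getD_self c i hci]
  | succ m ih =>
    have hmi : m < i := hm
    rw [List.range_succ, List.foldl_append, ih (Nat.le_of_lt hmi), List.foldl_cons,
      List.foldl_nil]
    unfold stepA
    by_cases hdv : PySem.Int.mod (l.getD i 0) (l.getD m 0) = 0
    · simp only [hdv, if_true, Finset.sum_range_succ]
      rw [getD_set_eq c i _ hci, List.set_set, getD_set_ne c i m _ (Nat.ne_of_lt hmi)]
      simp only [Prod.mk.injEq]
      exact ⟨by rw [add_assoc], by rw [add_assoc]⟩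
    · simp only [hdv, if_false, Finset.sum_range_succ, add_zero]

lemma outerA_spec (l : List Int) (m : Nat) (hm : m ≤ l.length) :
    ((List.range m).foldl (outerA l) (List.replicate l.length 0, 0)).1.length = l.length ∧
    (∀ k, ((List.range m).foldl (outerA l) (List.replicate l.length 0, 0)).1.getD k 0
        = if k < m then dcount l k else 0) ∧
    ((List.range m).foldl (outerA l) (List.replicate l.length 0, 0)).2
      = ∑ i ∈ Finset.range m, ∑ j ∈ Finset.range i,
          (if PySem.Int.mod (l.getD i 0) (l.getD j 0) = 0 then dcount l j else 0) := by
  induction m with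
  | zero =>
    refine ⟨by simp, fun k => ?_, by simp⟩
    simp [List.getD_eq_getElem?_getD, List.getElem?_replicate]
    split <;> rfl
  | succ m ih0 =>
    obtain ⟨hlen, hget, hsum⟩ := ih0 (by omega)
    rw [List.range_succ, List.foldl_append, List.foldl_cons, List.foldl_nil]
    generalize hst : (List.range m).foldl (outerA l) (List.replicate l.length 0, 0) = st
      at hlen hget hsum
    obtain ⟨c0, cnt0⟩ := st
    dsimp only at hlen hget hsum ⊢
    unfold outerA
    rw [innerA_spec l m (by omega) c0 hlen cnt0 m le_rfl]
    have hml : m < c0.length := by omega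
    refine ⟨by simpa using hlen, fun k => ?_, ?_⟩
    · by_cases hk : k = m
      · subst hk
        rw [getD_set_eq _ _ _ hml, hget k]
        simp [dcount]
      · rw [getD_set_ne _ _ _ _ hk, hget k]
        rcases Nat.lt_trichotomy k m with h | h | h
        · simp [h, Nat.lt_succ_of_lt h]
        · exact absurd h hk
        · have h1 : ¬ k < m := by omega
          have h2 : ¬ k < m + 1 := by omega
          simp [h1, h2]
    · rw [Finset.sum_range_succ, hsum]
      have hS : (∑ j ∈ Finset.range m,
            if PySem.Int.mod (l.getD m 0) (l.getD j 0) = 0 then c0.getD j 0 else 0)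
          = ∑ j ∈ Finset.range m,
            if PySem.Int.mod (l.getD m 0) (l.getD j 0) = 0 then dcount l j else 0 := by
        refine Finset.sum_congr rfl fun j hj => ?_
        have hjm : j < m := Finset.mem_range.mp hj
        rw [hget j]
        simp [hjm]
      rw [hS]

lemma sum_range_sum_range_swap (n : Nat) (f : Nat → Nat → Int) :
    ∑ i ∈ Finset.range n, ∑ j ∈ Finset.range i, f i j
      = ∑ j ∈ Finset.range n, ∑ i ∈ Finset.Ico (j + 1) n, f i j := by
  induction n with
  | zero => simp
  | succ m ih =>
    rw [Finset.sum_range_succ, ih, Finset.sum_range_succ]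
    have h1 : ∀ j ∈ Finset.range m, ∑ i ∈ Finset.Ico (j + 1) (m + 1), f i j
        = (∑ i ∈ Finset.Ico (j + 1) m, f i j) + f m j := by
      intro j hj
      exact Finset.sum_Ico_succ_top (Finset.mem_range.mp hj) _
    rw [Finset.sum_congr rfl h1, Finset.sum_add_distrib, Finset.Ico_self, Finset.sum_empty,
      add_zero]

lemma final_swap (l : List Int) :
    ∑ i ∈ Finset.range l.length, ∑ j ∈ Finset.range i,
        (if PySem.Int.mod (l.getD i 0) (l.getD j 0) = 0 then dcount l j else 0)
      = ∑ b ∈ Finset.range l.length, dcount l b * rcount l b := by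
  rw [sum_range_sum_range_swap l.length
    (fun i j => if PySem.Int.mod (l.getD i 0) (l.getD j 0) = 0 then dcount l j else 0)]
  refine Finset.sum_congr rfl fun b hb => ?_
  unfold rcount
  rw [Finset.mul_sum]
  refine Finset.sum_congr rfl fun i hi => ?_
  split_ifs <;> simp

-- ===== VERDICT (by name: the statement is the Claim_ definition above) =====
theorem solution_spec : Claim_equal_solution := by
  intro l _ _
  unfold Spec_solution
  rw [solution_eq_nat, solution_alt_eq_sum, (outerA_spec l l.length le_rfl).2.2, final_swap]
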